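-- pv_equiv track=rewrite | github.com/coding-frog117/Programmers | 프로그래머스/2/17679. ［1차］ 프렌즈4블록/［1차］ 프렌즈4블록.py | poll
-- ===== SOURCE A (Python) =====
-- def poll(maps,m,n):
--     newMap = [[None for i in range(n)] for i in range(m)]
--     # 55,45,35,25,15,05,  45,35...
--     # 거꾸로 돌면서 각 행을 채워나감
--     for i in range(n-1,-1,-1):
--         curr_x = i
--         curr_y = m-1
--         for j in range(m-1,-1,-1):
--             if maps[j][i] == None:
--                 continue
--             newMap[curr_y][curr_x] = maps[j][i]
--             curr_y -= 1
--
--     return newMap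
-- ===== SOURCE B (Python) =====
-- def poll(maps, m, n):
--     # Per-column filter-and-pad: collect each column's non-None cells top-down,
--     # prepend the missing Nones, then transpose the packed columns back to rows.
--     cols = []
--     for i in range(n):
--         vals = [maps[j][i] for j in range(m) if maps[j][i] is not None]
--         cols.append([None] * (m - len(vals)) + vals)
--     return [[cols[i][j] for i in range(n)] for j in range(m)]
-- ===== Notes on version B (the rewrite author's own statement) =====
-- stated objective: simpler
-- what changed: A pre-fills an m x n None grid and mutates it with a descending write pointer per column; B builds each packed column directly by filtering the column's non-None cells and prepending the computed number of Nones, then transposes the columns back to rows, with no mutation and no write pointer.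
import Mathlib
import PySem

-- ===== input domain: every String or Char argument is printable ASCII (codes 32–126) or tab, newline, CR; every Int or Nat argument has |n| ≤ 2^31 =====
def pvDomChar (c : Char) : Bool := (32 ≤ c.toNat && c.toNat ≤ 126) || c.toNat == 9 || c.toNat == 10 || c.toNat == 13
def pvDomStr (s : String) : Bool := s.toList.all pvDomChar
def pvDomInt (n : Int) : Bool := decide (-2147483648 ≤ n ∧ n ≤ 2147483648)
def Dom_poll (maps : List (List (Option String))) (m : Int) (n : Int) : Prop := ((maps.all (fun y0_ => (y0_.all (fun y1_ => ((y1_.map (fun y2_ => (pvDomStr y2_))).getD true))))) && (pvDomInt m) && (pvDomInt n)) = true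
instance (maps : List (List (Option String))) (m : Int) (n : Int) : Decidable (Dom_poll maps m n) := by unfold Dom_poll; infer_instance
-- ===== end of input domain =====

-- B replaces A's mutable grid + descending write pointer by per-column filter-and-pad plus a transpose (objective: simpler).

-- maps[j][i] (shared accessor; outer none = IndexError)
def pyCell (maps : List (List (Option String))) (j i : Int) : Option (Option String) :=
  (PySem.List.pyGet? maps j).bind (fun row => PySem.List.pyGet? row i)

-- ===== PORT A =====
-- newMap[y][x] = v; exact for the indices reached under Pre_poll (0 ≤ y, 0 ≤ x, in range)
def pollWrite (g : List (List (Option String))) (y x : Int) (v : Option String) : List (List (Option String)) :=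
  if 0 ≤ y ∧ 0 ≤ x then List.modify g y.toNat (fun row => row.set x.toNat v) else g

def pollStep (maps : List (List (Option String))) (i : Int)
    (st : List (List (Option String)) × Int) (j : Int) : List (List (Option String)) × Int :=
  match pyCell maps j i with
  | none => st   -- IndexError in Python; unreachable under Pre_poll
  | some c => if c = none then st else (pollWrite st.1 st.2 i c, st.2 - 1)

def poll (maps : List (List (Option String))) (m : Int) (n : Int) : List (List (Option String)) :=
  let newMap := (PySem.List.pyRange 0 m 1).map (fun _ => (PySem.List.pyRange 0 n 1).map (fun _ => (none : Option String)))
  (PySem.List.pyRange (n-1) (-1) (-1)).foldl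
    (fun g i => ((PySem.List.pyRange (m-1) (-1) (-1)).foldl (pollStep maps i) (g, m-1)).1)
    newMap

-- ===== PORT B =====
-- the comprehension filter 'maps[j][i] is not None'
def filtCell (maps : List (List (Option String))) (i j : Int) : Option (Option String) :=
  match pyCell maps j i with
  | some (some s) => some (some s)
  | _ => none

def pollColVals (maps : List (List (Option String))) (m i : Int) : List (Option String) :=
  (PySem.List.pyRange 0 m 1).filterMap (filtCell maps i)

def poll_alt (maps : List (List (Option String))) (m : Int) (n : Int) : List (List (Option String)) :=
  let cols := (PySem.List.pyRange 0 n 1).map (fun i =>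
    let vals := pollColVals maps m i
    List.replicate (m - (vals.length : Int)).toNat (none : Option String) ++ vals)
  (PySem.List.pyRange 0 m 1).map (fun j =>
    (PySem.List.pyRange 0 n 1).map (fun i =>
      (PySem.List.pyGet? ((PySem.List.pyGet? cols i).getD []) j).getD none))

-- ===== PRECONDITION & SPEC =====
-- Pre_poll: exactly the inputs on which Python A returns (A raises IndexError iff some maps[j][i]
-- with 0 ≤ j < m, 0 ≤ i < n is out of range; no access happens unless m > 0 and n > 0).
def Pre_poll (maps : List (List (Option String))) (m : Int) (n : Int) : Prop :=
  (0 < m ∧ 0 < n) → (m ≤ (maps.length : Int) ∧ ∀ row ∈ maps.take m.toNat, n ≤ (row.length : Int))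
instance (maps : List (List (Option String))) (m : Int) (n : Int) : Decidable (Pre_poll maps m n) := by unfold Pre_poll; infer_instance

def pvWitness_poll : List (List (Option String)) × Int × Int :=
  ([[some "A", none], [none, some "B"]], 2, 2)

def Spec_poll (maps : List (List (Option String))) (m : Int) (n : Int) (out : List (List (Option String))) : Prop := out = poll_alt maps m n
instance (maps : List (List (Option String))) (m : Int) (n : Int) (out : List (List (Option String))) : Decidable (Spec_poll maps m n out) := by unfold Spec_poll; infer_instance

-- ===== CLAIM (what is proved, stated in full; the proofs are below) =====
def Claim_equal_poll : Prop := ∀ (maps : List (List (Option String))) (m : Int) (n : Int), Dom_poll maps m n → Pre_poll maps m n → Spec_poll maps m n (poll maps m n)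

-- ===== LEMMAS AND PROOFS =====

-- A's inner loop, reformulated: write the filtered values downward from row y
def applyW : List (List (Option String)) → Int → Int → List (Option String) → List (List (Option String))
  | g, _, _, [] => g
  | g, i, y, v :: vs => applyW (pollWrite g y i v) i (y - 1) vs

def padOf (maps : List (List (Option String))) (m i : Int) : Int :=
  m - ((pollColVals maps m i).length : Int)

def rowT (maps : List (List (Option String))) (m i : Int) (r : Nat) (row : List (Option String)) : List (Option String) :=
  if padOf maps m i ≤ (r:Int) ∧ (r:Int) < m then
    row.set i.toNat ((pollColVals maps m i).getD (((r:Int) - padOf maps m i).toNat) none)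
  else row

def applyCols (maps : List (List (Option String))) (m : Int) : Nat → Nat → List (Option String) → List (Option String)
  | 0, _, row => row
  | k+1, r, row => applyCols maps m k r (rowT maps m (k:Int) r row)

theorem pollStep_eq (maps : List (List (Option String))) (i : Int)
    (st : List (List (Option String)) × Int) (j : Int) :
    pollStep maps i st j =
      match filtCell maps i j with
      | none => st
      | some v => (pollWrite st.1 st.2 i v, st.2 - 1) := by
  unfold pollStep filtCell
  rcases h : pyCell maps j i with _ | c
  · rfl
  · cases c <;> simp

theorem foldl_pollStep (maps : List (List (Option String))) (i : Int) :
    ∀ (js : List Int) (g : List (List (Option String))) (y : Int),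
    js.foldl (pollStep maps i) (g, y) =
      (applyW g i y (js.filterMap (filtCell maps i)),
        y - ((js.filterMap (filtCell maps i)).length : Int)) := by
  intro js
  induction js with
  | nil => intro g y; simp [applyW]
  | cons j js ih =>
    intro g y
    simp only [List.foldl_cons, List.filterMap_cons, pollStep_eq]
    rcases h : filtCell maps i j with _ | v
    · simp [ih]
    · rw [ih]
      simp only [applyW, List.length_cons]
      congr 1
      push_cast
      ring

theorem pollWrite_getElem? (g : List (List (Option String))) (y i : Int) (v : Option String)
    (hi : 0 ≤ i) (r : Nat) :
    (pollWrite g y i v)[r]? =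
      if (r:Int) = y then (g[r]?).map (fun row => row.set i.toNat v) else g[r]? := by
  unfold pollWrite
  by_cases hy : 0 ≤ y
  · simp only [hy, hi, and_self, if_true, List.getElem?_modify]
    by_cases hr : (r:Int) = y
    · have : y.toNat = r := by omega
      simp [this, hr]
    · have : y.toNat ≠ r := by omega
      simp [this, hr]
  · have hr : (r:Int) ≠ y := by omega
    simp [hy, hr]

theorem applyW_getElem? (i : Int) (hi : 0 ≤ i) :
    ∀ (vs : List (Option String)) (g : List (List (Option String))) (y : Int) (r : Nat),
    (applyW g i y vs)[r]? =
      if 0 ≤ y - (r:Int) ∧ y - (r:Int) < (vs.length : Int) then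
        (g[r]?).map (fun row => row.set i.toNat (vs.getD ((y - (r:Int)).toNat) none))
      else g[r]? := by
  intro vs
  induction vs with
  | nil => intro g y r; simp [applyW]
  | cons v vs ih =>
    intro g y r
    rw [show applyW g i y (v :: vs) = applyW (pollWrite g y i v) i (y - 1) vs from rfl, ih]
    simp only [List.length_cons]
    rw [pollWrite_getElem? g y i v hi r]
    by_cases hr : (r:Int) = y
    · rw [if_neg (by omega : ¬ (0 ≤ y - 1 - (r:Int) ∧ y - 1 - (r:Int) < (vs.length : Int)))]
      rw [if_pos hr]
      rw [if_pos (by push_cast; omega : 0 ≤ y - (r:Int) ∧ y - (r:Int) < (((vs.length + 1 : Nat)) : Int))]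
      rw [show (y - (r:Int)).toNat = 0 by omega]
      rfl
    · rw [if_neg hr]
      by_cases h5 : 0 ≤ y - 1 - (r:Int) ∧ y - 1 - (r:Int) < (vs.length : Int)
      · rw [if_pos h5]
        rw [if_pos (by push_cast; omega : 0 ≤ y - (r:Int) ∧ y - (r:Int) < (((vs.length + 1 : Nat)) : Int))]
        rw [show (y - (r:Int)).toNat = (y - 1 - (r:Int)).toNat + 1 by omega, List.getD_cons_succ]
      · rw [if_neg h5]
        rw [if_neg (by push_cast; omega : ¬ (0 ≤ y - (r:Int) ∧ y - (r:Int) < (((vs.length + 1 : Nat)) : Int)))]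

theorem vals_length_le (maps : List (List (Option String))) (m i : Int) :
    ((pollColVals maps m i).length : Int) ≤ m ∨ (pollColVals maps m i) = [] := by
  by_cases hm : 0 ≤ m
  · left
    have h := List.length_filterMap_le (filtCell maps i) (PySem.List.pyRange 0 m 1)
    have h2 : (PySem.List.pyRange 0 m 1).length = (m - 0).toNat := PySem.List.length_pyRange_one 0 m
    unfold pollColVals
    omega
  · right
    unfold pollColVals
    rw [PySem.List.pyRange_one_eq_nil (by omega)]
    rfl

theorem filt_desc (maps : List (List (Option String))) (m i : Int) :
    (PySem.List.pyRange (m-1) (-1) (-1)).filterMap (filtCell maps i) =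
      (pollColVals maps m i).reverse := by
  have h : PySem.List.pyRange (m-1) (-1) (-1) = (PySem.List.pyRange 0 m 1).reverse := by
    have := PySem.List.pyRange_neg_one_eq_reverse (m-1) (-1)
    simpa using this
  rw [h, List.filterMap_reverse]
  rfl

-- one column: the inner loop is exactly the row transformer rowT at every row
theorem colFold_getElem? (maps : List (List (Option String))) (m i : Int) (hi : 0 ≤ i)
    (g : List (List (Option String))) (r : Nat) :
    (((PySem.List.pyRange (m-1) (-1) (-1)).foldl (pollStep maps i) (g, m-1)).1)[r]? =
      (g[r]?).map (rowT maps m i r) := by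
  rw [foldl_pollStep, filt_desc]
  simp only [applyW_getElem? i hi]
  set vals := pollColVals maps m i with hv
  by_cases hc : 0 ≤ m - 1 - (r:Int) ∧ m - 1 - (r:Int) < (vals.reverse.length : Int)
  · have hlen : (vals.length : Int) ≤ m := by
      rcases vals_length_le maps m i with h | h
      · exact h
      · rw [← hv] at h; simp [h] at hc; omega
    have hr1 : padOf maps m i ≤ (r:Int) ∧ (r:Int) < m := by
      unfold padOf; rw [← hv]; simp at hc; omega
    have hidx : vals.reverse.getD ((m - 1 - (r:Int)).toNat) none =
        vals.getD (((r:Int) - padOf maps m i).toNat) none := by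
      have hk : (m - 1 - (r:Int)).toNat < vals.length := by simp at hc; omega
      have hk2 : (((r:Int) - padOf maps m i).toNat) < vals.length := by
        unfold padOf; rw [← hv]; omega
      rw [List.getD_eq_getElem?_getD, List.getD_eq_getElem?_getD,
        List.getElem?_reverse hk]
      congr 2
      unfold padOf
      rw [← hv]
      omega
    simp only [hc]
    unfold rowT
    rw [← hv, hidx]
    simp [hr1]
  · simp only [hc, if_false]
    have hr1 : ¬ (padOf maps m i ≤ (r:Int) ∧ (r:Int) < m) := by
      unfold padOf; rw [← hv]; simp at hc ⊢; intro h1; omega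
    unfold rowT
    rw [← hv]
    simp [hr1]

-- the outer loop over columns k-1, …, 0
theorem outer_getElem? (maps : List (List (Option String))) (m : Int) :
    ∀ (k : Nat) (g : List (List (Option String))) (r : Nat),
    ((PySem.List.pyRange ((k:Int)-1) (-1) (-1)).foldl
        (fun g i => ((PySem.List.pyRange (m-1) (-1) (-1)).foldl (pollStep maps i) (g, m-1)).1) g)[r]? =
      (g[r]?).map (applyCols maps m k r) := by
  intro k
  induction k with
  | zero =>
    intro g r
    rw [show ((0:Nat):Int) - 1 = (-1:Int) by norm_num]
    rw [PySem.List.pyRange_neg_one_eq_nil (show (-1:Int) ≤ -1 from le_refl _)]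
    simp only [List.foldl_nil, applyCols]
    cases g[r]? <;> rfl
  | succ k ih =>
    intro g r
    rw [show ((k+1:Nat):Int) - 1 = (k:Int) by push_cast; ring]
    rw [PySem.List.pyRange_neg_one_cons (show (-1:Int) < (k:Int) by omega)]
    simp only [List.foldl_cons]
    rw [ih]
    rw [colFold_getElem? maps m (k:Int) (by omega) g r]
    rw [Option.map_map]
    rfl

theorem applyCols_getElem? (maps : List (List (Option String))) (m : Int) :
    ∀ (k : Nat) (r : Nat) (row : List (Option String)) (x : Nat),
    (applyCols maps m k r row)[x]? =
      if x < k ∧ padOf maps m (x:Int) ≤ (r:Int) ∧ (r:Int) < m then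
        (if x < row.length then
          some ((pollColVals maps m (x:Int)).getD (((r:Int) - padOf maps m (x:Int)).toNat) none)
        else none)
      else row[x]? := by
  intro k
  induction k with
  | zero => intro r row x; simp [applyCols]
  | succ k ih =>
    intro r row x
    simp only [applyCols]
    rw [ih]
    have hlen : (rowT maps m (k:Int) r row).length = row.length := by
      unfold rowT; split <;> simp
    rw [hlen]
    by_cases h1 : x < k
    · have h2 : x < k + 1 := by omega
      by_cases hw : padOf maps m (x:Int) ≤ (r:Int) ∧ (r:Int) < m
      · simp [h1, h2, hw.1, hw.2]
      · rw [if_neg (by tauto), if_neg (by tauto)]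
        unfold rowT
        split
        · exact List.getElem?_set_ne (by omega)
        · rfl
    · by_cases hx : x = k
      · subst hx
        rw [if_neg (by tauto)]
        unfold rowT
        by_cases hwin : padOf maps m (x:Int) ≤ (r:Int) ∧ (r:Int) < m
        · rw [if_pos hwin]
          rw [if_pos (show x < x + 1 ∧ padOf maps m (x:Int) ≤ (r:Int) ∧ (r:Int) < m from ⟨Nat.lt_succ_self x, hwin⟩)]
          rw [List.getElem?_set]
          simp
        · rw [if_neg hwin, if_neg (by tauto)]
      · rw [if_neg (by tauto), if_neg (by rintro ⟨h, -⟩; omega)]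
        unfold rowT
        split
        · exact List.getElem?_set_ne (by omega)
        · rfl

theorem newMap_getElem? (m n : Int) (r : Nat) :
    ((PySem.List.pyRange 0 m 1).map (fun _ => (PySem.List.pyRange 0 n 1).map (fun _ => (none : Option String))))[r]? =
      if r < m.toNat then some (List.replicate n.toNat (none : Option String)) else none := by
  rw [show ((PySem.List.pyRange 0 n 1).map (fun _ => (none : Option String))) =
      List.replicate n.toNat (none : Option String) by
    rw [List.map_const']; congr 1; rw [PySem.List.length_pyRange_one]; omega]
  rw [List.map_const']
  rw [List.getElem?_replicate]
  rw [PySem.List.length_pyRange_one]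
  congr 2
  omega

theorem poll_getElem? (maps : List (List (Option String))) (m n : Int) (r : Nat) :
    (poll maps m n)[r]? =
      if r < m.toNat then some (applyCols maps m n.toNat r (List.replicate n.toNat none)) else none := by
  unfold poll
  by_cases hn : 0 ≤ n
  · rw [show (n:Int) - 1 = ((n.toNat:Nat):Int) - 1 by omega]
    rw [outer_getElem?]
    rw [newMap_getElem?]
    by_cases hr : r < m.toNat <;> simp [hr]
  · rw [PySem.List.pyRange_neg_one_eq_nil (show n - 1 ≤ (-1:Int) by omega)]
    simp only [List.foldl_nil]
    rw [newMap_getElem?]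
    have : n.toNat = 0 := by omega
    rw [this]
    by_cases hr : r < m.toNat <;> simp [hr, applyCols]

theorem packCol_getElem? (maps : List (List (Option String))) (m i : Int) (r : Nat)
    (hm : 0 < m) (hr : r < m.toNat) :
    (List.replicate (m - ((pollColVals maps m i).length : Int)).toNat (none : Option String) ++ pollColVals maps m i)[r]? =
      some (if padOf maps m i ≤ (r:Int) ∧ (r:Int) < m then
        (pollColVals maps m i).getD (((r:Int) - padOf maps m i).toNat) none
      else none) := by
  set vals := pollColVals maps m i with hv
  have hlen : (vals.length : Int) ≤ m := by
    rcases vals_length_le maps m i with h | h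
    · exact h
    · rw [← hv] at h; rw [h]; simp; omega
  have hpad : (m - (vals.length : Int)).toNat = m.toNat - vals.length := by omega
  by_cases hc : padOf maps m i ≤ (r:Int)
  · have hrep : ¬ r < (m - (vals.length : Int)).toNat := by
      unfold padOf at hc; rw [← hv] at hc; omega
    rw [List.getElem?_append_right (by simpa [List.length_replicate] using hrep)]
    have hidx : r - (List.replicate (m - (vals.length : Int)).toNat (none : Option String)).length =
        ((r:Int) - padOf maps m i).toNat := by
      simp only [List.length_replicate]
      unfold padOf; rw [← hv]; omega
    rw [hidx]
    have hin : (((r:Int) - padOf maps m i).toNat) < vals.length := by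
      unfold padOf; rw [← hv]; omega
    rw [List.getElem?_eq_getElem hin]
    have : padOf maps m i ≤ (r:Int) ∧ (r:Int) < m := ⟨hc, by omega⟩
    simp only [this]
    rw [List.getD_eq_getElem?_getD, List.getElem?_eq_getElem hin]
    rfl
  · have hrep : r < (List.replicate (m - (vals.length : Int)).toNat (none : Option String)).length := by
      simp only [List.length_replicate]
      unfold padOf at hc; rw [← hv] at hc; omega
    rw [List.getElem?_append_left (by simpa using hrep)]
    rw [List.getElem?_replicate]
    have : ¬ (padOf maps m i ≤ (r:Int) ∧ (r:Int) < m) := by tauto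
    simp only [this, if_false]
    simp only [List.length_replicate] at hrep
    rw [if_pos hrep]

theorem poll_alt_getElem? (maps : List (List (Option String))) (m n : Int) (r : Nat) :
    (poll_alt maps m n)[r]? =
      if r < m.toNat then
        some ((PySem.List.pyRange 0 n 1).map (fun i =>
          (PySem.List.pyGet? (List.replicate (m - ((pollColVals maps m i).length : Int)).toNat (none : Option String) ++ pollColVals maps m i) (r:Nat)).getD none))
      else none := by
  unfold poll_alt
  simp only
  rw [PySem.List.pyRange_one 0 m]
  rw [List.map_map, List.getElem?_map]
  by_cases hr : r < m.toNat
  · rw [List.getElem?_range (by omega : r < (m - 0).toNat)]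
    simp only [Option.map_some, Function.comp, zero_add]
    rw [if_pos hr]
    congr 1
    apply List.map_congr_left
    intro i hi
    have hi0 : 0 ≤ i ∧ i < n := by
      have := (PySem.List.mem_pyRange_one).1 hi
      exact ⟨this.1, this.2⟩
    have hcols : PySem.List.pyGet? ((PySem.List.pyRange 0 n 1).map (fun i =>
        List.replicate (m - ((pollColVals maps m i).length : Int)).toNat (none : Option String) ++ pollColVals maps m i)) i =
        some (List.replicate (m - ((pollColVals maps m i).length : Int)).toNat (none : Option String) ++ pollColVals maps m i) := by
      rw [show i = ((i.toNat : Nat) : Int) by omega]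
      rw [PySem.List.pyGet?_natCast]
      rw [show (n:Int) = ((n.toNat : Nat) : Int) by omega]
      rw [PySem.List.getElem?_map_pyRange_zero _ n.toNat i.toNat (by omega)]
    rw [hcols]
    simp only [Option.getD_some]
  · rw [if_neg hr, List.getElem?_eq_none (by rw [List.length_range]; omega)]
    rfl

-- ===== main equality =====
theorem poll_eq_alt (maps : List (List (Option String))) (m n : Int) :
    poll maps m n = poll_alt maps m n := by
  apply List.ext_getElem?
  intro r
  rw [poll_getElem?, poll_alt_getElem?]
  by_cases hr : r < m.toNat
  · simp only [hr, if_true]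
    have hm : 0 < m := by omega
    congr 1
    apply List.ext_getElem?
    intro x
    rw [List.getElem?_map]
    rw [applyCols_getElem?]
    rw [PySem.List.pyRange_one 0 n]
    rw [List.getElem?_map]
    by_cases hx : x < n.toNat
    · rw [List.getElem?_range (show x < (n - 0).toNat by omega)]
      simp only [Option.map_some, zero_add]
      rw [PySem.List.pyGet?_natCast]
      rw [packCol_getElem? maps m (x:Int) r hm hr]
      simp only [Option.getD_some]
      by_cases hwin : padOf maps m (x:Int) ≤ (r:Int) ∧ (r:Int) < m
      · rw [if_pos (show x < n.toNat ∧ padOf maps m (x:Int) ≤ (r:Int) ∧ (r:Int) < m from ⟨hx, hwin⟩)]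
        rw [if_pos (show x < (List.replicate n.toNat (none : Option String)).length by
          rw [List.length_replicate]; omega)]
        rw [if_pos hwin]
      · rw [if_neg (show ¬ (x < n.toNat ∧ padOf maps m (x:Int) ≤ (r:Int) ∧ (r:Int) < m) by tauto)]
        rw [if_neg hwin]
        rw [List.getElem?_replicate, if_pos hx]
    · have h1 : ¬ (x < n.toNat ∧ padOf maps m (x:Int) ≤ (r:Int) ∧ (r:Int) < m) := by tauto
      rw [if_neg h1]
      rw [List.getElem?_eq_none (show (List.replicate n.toNat (none : Option String)).length ≤ x by
        rw [List.length_replicate]; omega)]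
      rw [List.getElem?_eq_none (show (List.range (n - 0).toNat).length ≤ x by
        rw [List.length_range]; omega)]
      rfl
  · simp [hr]

-- ===== VERDICT (by name: the statement is the Claim_ definition above) =====
theorem poll_spec : Claim_equal_poll := by
  intro maps m n _ _
  unfold Spec_poll
  exact poll_eq_alt maps m n
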